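-- pv_equiv track=rewrite | github.com/jisupark123/Python-Coding-Test | 알쓰2기/week2/3986.py | is_good_word
-- ===== SOURCE A (Python) =====
-- def is_good_word(word):
--     stack = []
--     for w in word:
--         if len(stack) == 0 or stack[-1] != w:
--             stack.append(w)
--         elif stack[-1] == w:
--             stack.pop()
--
--     if len(stack):
--         return False
--     return True
-- ===== SOURCE B (Python) =====
-- def is_good_word(word):
--     # Repeatedly delete the first adjacent equal pair until none remains.
--     word = list(word)
--     while True:
--         for i in range(len(word) - 1):
--             if word[i] == word[i + 1]:
--                 word = word[:i] + word[i + 2:]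
--                 break
--         else:
--             return len(word) == 0
-- ===== Notes on version B (the rewrite author's own statement) =====
-- stated objective: alternative
-- what changed: Replaces the single-pass stack cancellation with repeated rewriting: scan for the first adjacent equal pair, delete it, rescan from the start, and report whether the word reduces to empty.
import Mathlib
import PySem

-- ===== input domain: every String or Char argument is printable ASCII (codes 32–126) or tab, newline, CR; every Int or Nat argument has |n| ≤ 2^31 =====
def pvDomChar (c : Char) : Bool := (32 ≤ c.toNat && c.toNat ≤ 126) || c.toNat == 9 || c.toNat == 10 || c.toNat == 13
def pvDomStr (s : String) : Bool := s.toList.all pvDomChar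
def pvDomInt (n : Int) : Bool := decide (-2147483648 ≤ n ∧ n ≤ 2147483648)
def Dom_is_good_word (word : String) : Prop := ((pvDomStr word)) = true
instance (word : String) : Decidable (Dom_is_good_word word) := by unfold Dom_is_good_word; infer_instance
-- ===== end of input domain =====

-- B replaces A's one-pass stack cancellation by repeated deletion of the first
-- adjacent equal pair until none remains (objective: alternative algorithm).

-- ===== PORT A =====
-- the body of A's for-loop: append unless the top equals w, else pop
def stepA (stack : List Char) (w : Char) : List Char :=
  if stack.length = 0 ∨ PySem.List.pyGet? stack (-1) ≠ some w then stack ++ [w]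
  else if PySem.List.pyGet? stack (-1) = some w then stack.dropLast
  else stack

def is_good_word (word : String) : Bool :=
  let stack := word.toList.foldl stepA []
  if stack.length ≠ 0 then false else true

-- ===== PORT B =====
-- the inner for-loop of B: index of the first adjacent equal pair, if any
def findPair : List Char → Option Nat
  | a :: b :: t => if a = b then some 0 else (findPair (b :: t)).map (· + 1)
  | _ => none

theorem findPair_le : ∀ (l : List Char) (i : Nat), findPair l = some i → i + 2 ≤ l.length := by
  intro l
  induction l with
  | nil => intro i h; simp [findPair] at h
  | cons a t ih =>
    intro i h
    cases t with
    | nil => simp [findPair] at h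
    | cons b t' =>
      by_cases hab : a = b
      · simp [findPair, hab] at h; subst h; simp
      · simp [findPair, hab] at h
        obtain ⟨j, hj, rfl⟩ := h
        have := ih j hj
        simpa using Nat.succ_le_succ this

-- B's while-loop: delete the first adjacent equal pair, rescan, until none
def reduceWord (l : List Char) : List Char :=
  match h : findPair l with
  | some i => reduceWord (l.take i ++ l.drop (i + 2))
  | none => l
termination_by l.length
decreasing_by
  have h2 := findPair_le l i h
  simp [List.length_take, List.length_drop]
  omega

def is_good_word_alt (word : String) : Bool :=
  (reduceWord word.toList).length == 0

-- ===== PRECONDITION & SPEC =====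
def Spec_is_good_word (word : String) (out : Bool) : Prop := out = is_good_word_alt word
instance (word : String) (out : Bool) : Decidable (Spec_is_good_word word out) := by unfold Spec_is_good_word; infer_instance

-- ===== CLAIM (what is proved, stated in full; the proofs are below) =====
def Claim_equal_is_good_word : Prop := ∀ (word : String), Dom_is_good_word word → Spec_is_good_word word (is_good_word word)

-- ===== LEMMAS AND PROOFS =====

-- A's stack with its top at the head instead of the tail
def rstep (r : List Char) (w : Char) : List Char :=
  match r with
  | [] => [w]
  | x :: rs => if x = w then rs else w :: x :: rs

theorem stepA_eq_rstep (r : List Char) (w : Char) :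
    stepA r.reverse w = (rstep r w).reverse := by
  cases r with
  | nil => simp [stepA, rstep]
  | cons x rs =>
    have hlast : PySem.List.pyGet? (x :: rs).reverse (-1) = some x := by
      simp [PySem.List.pyGet?_neg_one]
    by_cases hxw : x = w
    · subst hxw
      simp [stepA, rstep, List.reverse_cons]
    · simp [stepA, rstep, hxw, List.reverse_cons]

theorem foldA_eq : ∀ (m : List Char) (r : List Char),
    List.foldl stepA r.reverse m = (List.foldl rstep r m).reverse := by
  intro m
  induction m with
  | nil => intro r; simp
  | cons c m' ih =>
    intro r
    simp only [List.foldl_cons, stepA_eq_rstep]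
    exact ih (rstep r c)

-- no two adjacent equal characters
def ok : List Char → Bool
  | a :: b :: t => (a ≠ b) && ok (b :: t)
  | _ => true

theorem ok_tail : ∀ (a : Char) (t : List Char), ok (a :: t) = true → ok t = true := by
  intro a t h
  cases t with
  | nil => rfl
  | cons b t' => simp [ok] at h; exact h.2

theorem ok_rstep (r : List Char) (w : Char) (h : ok r = true) : ok (rstep r w) = true := by
  cases r with
  | nil => rfl
  | cons x rs =>
    by_cases hxw : x = w
    · simpa [rstep, hxw] using ok_tail x rs h
    · cases rs with
      | nil => simp [rstep, hxw, ok, Ne.symm hxw]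
      | cons y rs' =>
        simp [rstep, hxw, ok] at h ⊢
        exact ⟨Ne.symm hxw, h⟩

theorem ok_foldl : ∀ (m r : List Char), ok r = true → ok (List.foldl rstep r m) = true := by
  intro m
  induction m with
  | nil => intro r h; simpa using h
  | cons c m' ih => intro r h; exact ih _ (ok_rstep r c h)

-- skipping an adjacent equal pair does not change the stack
theorem rstep_pair (r : List Char) (c : Char) (h : ok r = true) :
    rstep (rstep r c) c = r := by
  cases r with
  | nil => simp [rstep]
  | cons x rs =>
    by_cases hxc : x = c
    · subst hxc
      cases rs with
      | nil => simp [rstep]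
      | cons y rs' =>
        simp [ok] at h
        simp [rstep, Ne.symm h.1]
    · simp [rstep, hxc]

theorem foldl_pair (t r : List Char) (c : Char) (h : ok r = true) :
    List.foldl rstep r (c :: c :: t) = List.foldl rstep r t := by
  simp only [List.foldl_cons, rstep_pair r c h]

-- in an already-irreducible word the two characters around any position differ
theorem ok_mid : ∀ (u : List Char) (x c : Char) (v : List Char),
    ok (u ++ x :: c :: v) = true → x ≠ c := by
  intro u
  induction u with
  | nil => intro x c v h; simp [ok] at h; exact h.1
  | cons a u' ih =>
    intro x c v h
    exact ih x c v (ok_tail a _ h)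

-- an irreducible word passes through the stack unchanged
theorem foldl_irred : ∀ (m r : List Char), ok (r.reverse ++ m) = true →
    List.foldl rstep r m = m.reverse ++ r := by
  intro m
  induction m with
  | nil => intro r _; simp
  | cons c m' ih =>
    intro r h
    have hstep : rstep r c = c :: r := by
      cases r with
      | nil => rfl
      | cons x rs =>
        have hx : x ≠ c := by
          apply ok_mid rs.reverse x c m'
          simpa using h
        simp [rstep, hx]
    have h' : ok ((c :: r).reverse ++ m') = true := by
      simpa using h
    simp only [List.foldl_cons, hstep, ih (c :: r) h']
    simp

theorem findPair_none_ok : ∀ (l : List Char), findPair l = none → ok l = true := by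
  intro l
  induction l with
  | nil => intro _; rfl
  | cons a t ih =>
    intro h
    cases t with
    | nil => rfl
    | cons b t' =>
      by_cases hab : a = b
      · simp [findPair, hab] at h
      · simp [findPair, hab] at h
        simp [ok, hab, ih h]

theorem findPair_some_shape : ∀ (l : List Char) (i : Nat), findPair l = some i →
    ∃ c, l.take i ++ c :: c :: l.drop (i + 2) = l := by
  intro l
  induction l with
  | nil => intro i h; simp [findPair] at h
  | cons a t ih =>
    intro i h
    cases t with
    | nil => simp [findPair] at h
    | cons b t' =>
      by_cases hab : a = b
      · simp [findPair, hab] at h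
        subst h
        exact ⟨a, by simp [hab]⟩
      · simp [findPair, hab] at h
        obtain ⟨j, hj, rfl⟩ := h
        obtain ⟨c, hc⟩ := ih j hj
        refine ⟨c, ?_⟩
        simpa [List.take, List.drop] using congrArg (a :: ·) hc

theorem reduceWord_none (l : List Char) (h : findPair l = none) : reduceWord l = l := by
  rw [reduceWord.eq_def]
  split <;> simp_all

theorem reduceWord_some (l : List Char) (i : Nat) (h : findPair l = some i) :
    reduceWord l = reduceWord (l.take i ++ l.drop (i + 2)) := by
  rw [reduceWord.eq_def]
  split <;> simp_all

theorem stack_eq_reduce_aux : ∀ (n : Nat) (l : List Char), l.length ≤ n →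
    List.foldl stepA [] l = reduceWord l := by
  intro n
  induction n with
  | zero =>
    intro l hl
    have : l = [] := List.eq_nil_of_length_eq_zero (Nat.le_zero.mp hl)
    subst this
    rw [reduceWord_none [] rfl]
    rfl
  | succ n ih =>
    intro l hl
    cases h : findPair l with
    | none =>
      have hok := findPair_none_ok l h
      have hstack : List.foldl rstep [] l = l.reverse := by
        simpa using foldl_irred l [] (by simpa using hok)
      have lhs : List.foldl stepA [] l = (List.foldl rstep [] l).reverse := by
        simpa using foldA_eq l []
      rw [reduceWord_none l h, lhs, hstack, List.reverse_reverse]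
    | some i =>
      obtain ⟨c, hc⟩ := findPair_some_shape l i h
      have hle := findPair_le l i h
      have key : List.foldl rstep [] l = List.foldl rstep [] (l.take i ++ l.drop (i + 2)) := by
        conv_lhs => rw [← hc]
        rw [List.foldl_append, List.foldl_append]
        exact foldl_pair _ _ c (ok_foldl (l.take i) [] rfl)
      have lhs : List.foldl stepA [] l = (List.foldl rstep [] l).reverse := by
        simpa using foldA_eq l []
      have rhs : List.foldl stepA [] (l.take i ++ l.drop (i + 2)) =
          (List.foldl rstep [] (l.take i ++ l.drop (i + 2))).reverse := by
        simpa using foldA_eq (l.take i ++ l.drop (i + 2)) []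
      have hlen : (l.take i ++ l.drop (i + 2)).length ≤ n := by
        simp [List.length_take, List.length_drop]
        omega
      rw [reduceWord_some l i h, lhs, key, ← rhs, ih _ hlen]

theorem stack_eq_reduce (l : List Char) : List.foldl stepA [] l = reduceWord l :=
  stack_eq_reduce_aux l.length l (Nat.le_refl _)

-- ===== VERDICT (by name: the statement is the Claim_ definition above) =====
theorem is_good_word_spec : Claim_equal_is_good_word := by
  unfold Claim_equal_is_good_word Spec_is_good_word
  intro word _
  unfold is_good_word is_good_word_alt
  rw [stack_eq_reduce word.toList]
  cases h : (reduceWord word.toList).length with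
  | zero => simp [h]
  | succ n => simp [h]
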